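-- pv_equiv track=rewrite | github.com/mayankdaruka/Omelia | server/model.py | isCellValue
-- ===== SOURCE A (Python) =====
-- def isCellValue(word):
--     letter_flag = True
--     if (word[0].isalpha()):
--         for index in range(1, len(word), 1):
--             if (word[index].isalpha() and (not letter_flag)):
--                 return False
--             if (word[index].isdigit()):
--                 letter_flag = False
--         return (not letter_flag)
--     return False
-- ===== SOURCE B (Python) =====
-- def isCellValue(word):
--     if not word[0].isalpha():
--         return False
--     letters = [i for i, c in enumerate(word) if c.isalpha()]
--     digits = [i for i, c in enumerate(word) if c.isdigit()]
--     return bool(digits) and letters[-1] < digits[0]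
-- ===== Notes on version B (the rewrite author's own statement) =====
-- stated objective: alternative
-- what changed: Instead of A's flag-threaded single pass with early returns, B builds the lists of letter positions and digit positions and decides by one comparison: some digit exists and the last letter position precedes the first digit position.
import Mathlib
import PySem

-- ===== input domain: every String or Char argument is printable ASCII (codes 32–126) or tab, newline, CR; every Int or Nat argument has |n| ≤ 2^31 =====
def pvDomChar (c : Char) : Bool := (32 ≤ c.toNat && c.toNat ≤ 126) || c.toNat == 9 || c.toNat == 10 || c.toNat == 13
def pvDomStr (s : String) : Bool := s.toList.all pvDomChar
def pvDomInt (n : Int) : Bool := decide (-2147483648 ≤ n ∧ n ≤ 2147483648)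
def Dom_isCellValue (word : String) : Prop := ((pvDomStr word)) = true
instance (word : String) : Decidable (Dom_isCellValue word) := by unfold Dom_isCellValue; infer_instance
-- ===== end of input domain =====

-- B replaces A's flag-threaded single pass by collecting letter/digit positions and
-- comparing last-letter position against first-digit position (objective: alternative).

-- ===== PORT A =====
-- the for-loop over range(1, len(word)) with the letter_flag accumulator and early returns
def pvLoopA : List Char → Bool → Bool
  | [], flag => !flag
  | c :: rest, flag =>
    if PySem.Chars.isalpha c && !flag then false
    else if PySem.Chars.isdigit c then pvLoopA rest false
    else pvLoopA rest flag

def isCellValue (word : String) : Bool :=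
  match word.toList with
  | [] => false                 -- Python raises IndexError here; excluded by Pre_
  | c :: rest =>
    if PySem.Chars.isalpha c then pvLoopA rest true
    else false

-- ===== PORT B =====
-- [i for i, c in enumerate(word) if p(c)]  (used twice in Source B, for isalpha and isdigit)
def pvIdxWhere (p : Char → Bool) (l : List Char) : List Int :=
  (PySem.List.enumerate l).filterMap (fun q => if p q.2 then some q.1 else none)

def isCellValue_alt (word : String) : Bool :=
  match word.toList with
  | [] => false                 -- Python raises IndexError here; excluded by Pre_
  | c :: rest =>
    if !(PySem.Chars.isalpha c) then false
    else
      match pvIdxWhere PySem.Chars.isdigit (c :: rest) with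
      | [] => false             -- bool(digits) is False
      | d :: _ =>               -- letters[-1] < digits[0]
        decide ((pvIdxWhere PySem.Chars.isalpha (c :: rest)).getLast! < d)

-- ===== PRECONDITION & SPEC =====
-- Pre_ excludes only the empty string, on which both Pythons raise IndexError at word[0].
def Pre_isCellValue (word : String) : Prop := word.toList ≠ []
instance (word : String) : Decidable (Pre_isCellValue word) := by unfold Pre_isCellValue; infer_instance
def pvWitness_isCellValue : String := "A1"

def Spec_isCellValue (word : String) (out : Bool) : Prop := out = isCellValue_alt word
instance (word : String) (out : Bool) : Decidable (Spec_isCellValue word out) := by unfold Spec_isCellValue; infer_instance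

-- ===== CLAIM (what is proved, stated in full; the proofs are below) =====
def Claim_equal_isCellValue : Prop := ∀ (word : String), Dom_isCellValue word → Pre_isCellValue word → Spec_isCellValue word (isCellValue word)

-- ===== LEMMAS AND PROOFS =====

-- generalized-start version of pvIdxWhere, for the inductions
def pvIdxW (p : Char → Bool) (l : List Char) (s : Int) : List Int :=
  (PySem.List.enumerate l s).filterMap (fun q => if p q.2 then some q.1 else none)

theorem pvIdxWhere_eq (p : Char → Bool) (l : List Char) : pvIdxWhere p l = pvIdxW p l 0 := rfl

theorem pvIdxW_cons (p : Char → Bool) (c : Char) (l : List Char) (s : Int) :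
    pvIdxW p (c :: l) s = (if p c then [s] else []) ++ pvIdxW p l (s + 1) := by
  by_cases hc : p c = true <;>
    simp [pvIdxW, PySem.List.enumerate_cons, hc]

theorem pvDigitNotAlpha {c : Char} (h : PySem.Chars.isdigit c = true) :
    PySem.Chars.isalpha c = false := by
  simp only [PySem.Chars.isdigit, Bool.and_eq_true, decide_eq_true_eq] at h
  have h9 : c < 'A' := lt_of_le_of_lt h.2 (by decide)
  simp only [PySem.Chars.isalpha, PySem.Chars.isupper, PySem.Chars.islower,
    Bool.or_eq_false_iff, Bool.and_eq_false_iff, decide_eq_false_iff_not]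
  exact ⟨Or.inl (not_le.mpr h9), Or.inl (not_le.mpr (lt_trans h9 (by decide)))⟩

theorem pvAlphaNotDigit {c : Char} (h : PySem.Chars.isalpha c = true) :
    PySem.Chars.isdigit c = false := by
  simp only [PySem.Chars.isalpha, PySem.Chars.isupper, PySem.Chars.islower,
    Bool.or_eq_true, Bool.and_eq_true, decide_eq_true_eq] at h
  simp only [PySem.Chars.isdigit, Bool.and_eq_false_iff, decide_eq_false_iff_not]
  rcases h with ⟨hA, _⟩ | ⟨hA, _⟩
  · exact Or.inr (not_le.mpr (lt_of_lt_of_le (by decide) hA))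
  · exact Or.inr (not_le.mpr (lt_of_lt_of_le (by decide) hA))

-- once a digit has been seen (flag = false), A's loop returns True iff no letter remains
theorem pvLoopA_false (l : List Char) : pvLoopA l false = !(l.any PySem.Chars.isalpha) := by
  induction l with
  | nil => rfl
  | cons c rest ih =>
    by_cases ha : PySem.Chars.isalpha c = true
    · simp [pvLoopA, ha]
    · simp at ha
      simp [pvLoopA, ha, ih]

-- A's loop with flag = true computes the find-first-digit / check-suffix value
theorem pvLoopA_true (l : List Char) :
    pvLoopA l true =
      (match l.findIdx? PySem.Chars.isdigit with
       | none => false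
       | some j => !((l.drop j).any PySem.Chars.isalpha)) := by
  induction l with
  | nil => rfl
  | cons c rest ih =>
    by_cases hd : PySem.Chars.isdigit c = true
    · simp [pvLoopA, pvDigitNotAlpha hd, hd, List.findIdx?_cons, pvLoopA_false]
    · simp at hd
      simp [pvLoopA, hd, List.findIdx?_cons, ih]
      cases rest.findIdx? PySem.Chars.isdigit <;> simp

-- no hit: the index list is empty
theorem pvIdxW_none (p : Char → Bool) (l : List Char) :
    ∀ s : Int, l.findIdx? p = none → pvIdxW p l s = [] := by
  induction l with
  | nil => intro s _; rfl
  | cons c rest ih =>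
    intro s h
    rw [List.findIdx?_cons] at h
    by_cases hc : p c = true
    · simp [hc] at h
    · simp at hc
      simp [hc] at h
      simp [pvIdxW_cons, hc, ih (s + 1) (by simpa using h)]

-- first hit at j: the index list starts with s + j
theorem pvIdxW_some (p : Char → Bool) (l : List Char) :
    ∀ (s : Int) (j : Nat), l.findIdx? p = some j →
      ∃ t, pvIdxW p l s = (s + (j : Int)) :: t := by
  induction l with
  | nil => intro s j h; simp at h
  | cons c rest ih =>
    intro s j h
    rw [List.findIdx?_cons] at h
    by_cases hc : p c = true
    · simp [hc] at h
      exact ⟨pvIdxW p rest (s + 1), by simp [pvIdxW_cons, hc, ← h]⟩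
    · simp at hc
      simp [hc] at h
      obtain ⟨j', hj', rfl⟩ := h
      obtain ⟨t, ht⟩ := ih (s + 1) j' hj'
      exact ⟨t, by simp [pvIdxW_cons, hc, ht]; omega⟩

-- membership in the index list
theorem pvIdxW_mem (p : Char → Bool) (l : List Char) (s x : Int) :
    x ∈ pvIdxW p l s ↔ ∃ (k : Nat) (h : k < l.length), x = s + (k : Int) ∧ p l[k] = true := by
  simp only [pvIdxW, List.mem_filterMap]
  constructor
  · rintro ⟨⟨i, c⟩, hmem, hsel⟩
    rw [PySem.List.mem_enumerate_iff] at hmem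
    obtain ⟨k, hk, hpq⟩ := hmem
    by_cases hc : p c = true
    · simp [hc] at hsel
      cases hpq
      exact ⟨k, hk, hsel ▸ rfl, by simpa using hc⟩
    · simp at hc; simp [hc] at hsel
  · rintro ⟨k, hk, rfl, hp⟩
    exact ⟨(s + (k : Int), l[k]), by rw [PySem.List.mem_enumerate_iff]; exact ⟨k, hk, rfl⟩,
      by simp [hp]⟩

-- the index list is strictly increasing
theorem pvIdxW_pairwise (p : Char → Bool) (l : List Char) :
    ∀ s : Int, (pvIdxW p l s).Pairwise (· < ·) := by
  induction l with
  | nil => intro s; simp [pvIdxW]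
  | cons c rest ih =>
    intro s
    rw [pvIdxW_cons]
    by_cases hc : p c = true
    · simp only [hc, if_true, List.singleton_append, List.pairwise_cons]
      refine ⟨fun x hx => ?_, ih (s + 1)⟩
      rw [pvIdxW_mem] at hx
      obtain ⟨k, _, rfl, _⟩ := hx
      omega
    · simp at hc; simp [hc, ih (s + 1)]

-- for a strictly increasing nonempty list, the last element is below t iff all are
theorem pvLastMax (L : List Int) (t : Int) (hs : L.Pairwise (· < ·)) (hne : L ≠ []) :
    (L.getLast! < t ↔ ∀ x ∈ L, x < t) := by
  induction L with
  | nil => exact absurd rfl hne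
  | cons a L' ih =>
    cases L' with
    | nil =>
      have h1 : ([a] : List Int).getLast! = a := rfl
      rw [h1]; simp
    | cons b L'' =>
      rw [List.pairwise_cons] at hs
      have hab : a < b := hs.1 _ (List.mem_cons_self ..)
      have := ih hs.2 (by simp)
      have h2 : (a :: b :: L'').getLast! = (b :: L'').getLast! := rfl
      rw [h2, this]
      constructor
      · intro h x hx
        rcases List.mem_cons.1 hx with rfl | hx
        · exact lt_trans hab (h b (by simp))
        · exact h x hx
      · intro h x hx
        exact h x (List.mem_cons_of_mem _ hx)

-- ===== VERDICT (by name: the statement is the Claim_ definition above) =====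
-- any letter in the suffix from position j, via indices
theorem pvDropAny (l : List Char) (j : Nat) :
    (l.drop j).any PySem.Chars.isalpha = true ↔
      ∃ (k : Nat) (hk : k < l.length), j ≤ k ∧ PySem.Chars.isalpha l[k] = true := by
  rw [List.any_eq_true]
  constructor
  · rintro ⟨x, hx, hpx⟩
    obtain ⟨i, hi, rfl⟩ := List.mem_iff_getElem.1 hx
    rw [List.getElem_drop] at hpx
    have hi' : j + i < l.length := by simp [List.length_drop] at hi; omega
    exact ⟨j + i, hi', by omega, hpx⟩
  · rintro ⟨k, hk, hjk, hpk⟩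
    refine ⟨l[k], List.mem_iff_getElem.2 ⟨k - j, by simp [List.length_drop]; omega, ?_⟩, hpk⟩
    rw [List.getElem_drop]; congr 1; omega

-- the heart: suffix-has-no-letter equals last-letter-index-before-first-digit-index
theorem pvMain (c : Char) (rest : List Char) (ha : PySem.Chars.isalpha c = true) (j : Nat) :
    (!(((c :: rest).drop j).any PySem.Chars.isalpha)) =
      decide ((pvIdxW PySem.Chars.isalpha (c :: rest) 0).getLast! < ((0 : Int) + (j : Int))) := by
  have hmem0 : (0 : Int) ∈ pvIdxW PySem.Chars.isalpha (c :: rest) 0 :=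
    (pvIdxW_mem _ _ _ _).mpr ⟨0, by simp, by norm_num, by simpa using ha⟩
  have hne : pvIdxW PySem.Chars.isalpha (c :: rest) 0 ≠ [] := by
    intro h; rw [h] at hmem0; simp at hmem0
  have hiff := pvLastMax _ ((0 : Int) + (j : Int)) (pvIdxW_pairwise _ (c :: rest) 0) hne
  by_cases hP : ∃ (k : Nat) (hk : k < (c :: rest).length), j ≤ k ∧ PySem.Chars.isalpha (c :: rest)[k] = true
  · have hA : ((c :: rest).drop j).any PySem.Chars.isalpha = true := (pvDropAny _ _).mpr hP
    have hB : ¬ ((pvIdxW PySem.Chars.isalpha (c :: rest) 0).getLast! < ((0 : Int) + (j : Int))) := by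
      intro hlt
      obtain ⟨k, hk, hjk, hpk⟩ := hP
      have := hiff.mp hlt ((0 : Int) + (k : Int)) ((pvIdxW_mem _ _ _ _).mpr ⟨k, hk, rfl, hpk⟩)
      omega
    rw [hA]; simp only [Bool.not_true]; exact (decide_eq_false hB).symm
  · have hA : ((c :: rest).drop j).any PySem.Chars.isalpha = false := by
      rw [← Bool.not_eq_true, pvDropAny]; exact hP
    have hB : (pvIdxW PySem.Chars.isalpha (c :: rest) 0).getLast! < ((0 : Int) + (j : Int)) := by
      refine hiff.mpr (fun x hx => ?_)
      obtain ⟨k, hk, rfl, hpk⟩ := (pvIdxW_mem _ _ _ _).mp hx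
      by_contra hge
      exact hP ⟨k, hk, by omega, hpk⟩
    rw [hA]; simp only [Bool.not_false]; exact (decide_eq_true hB).symm

-- ===== VERDICT (continued) =====
theorem isCellValue_spec : Claim_equal_isCellValue := by
  intro word _ _
  unfold Spec_isCellValue isCellValue isCellValue_alt
  cases h : word.toList with
  | nil => rfl
  | cons c rest =>
    by_cases ha : PySem.Chars.isalpha c = true
    case neg => simp at ha; simp [ha]
    case pos =>
    have hd : PySem.Chars.isdigit c = false := pvAlphaNotDigit ha
    simp only [ha, Bool.not_true, Bool.false_eq_true, if_false, if_true]
    rw [pvLoopA_true]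
    have hAeq : (match rest.findIdx? PySem.Chars.isdigit with
        | none => false
        | some j => !((rest.drop j).any PySem.Chars.isalpha)) =
        (match (c :: rest).findIdx? PySem.Chars.isdigit with
        | none => false
        | some j => !(((c :: rest).drop j).any PySem.Chars.isalpha)) := by
      rw [List.findIdx?_cons]
      simp only [hd, Bool.false_eq_true, if_false]
      cases rest.findIdx? PySem.Chars.isdigit <;> simp [List.drop_succ_cons]
    rw [hAeq]
    cases hf : (c :: rest).findIdx? PySem.Chars.isdigit with
    | none => rw [pvIdxWhere_eq, pvIdxW_none _ _ 0 hf]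
    | some j =>
      obtain ⟨t, ht⟩ := pvIdxW_some _ _ 0 j hf
      rw [pvIdxWhere_eq, pvIdxWhere_eq, ht]
      exact pvMain c rest ha j
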